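-- pv_equiv track=rewrite | github.com/homveloper/CoTe | 035_이분탐색_입국심사/solution.py | solution
-- ===== SOURCE A (Python) =====
-- def solution(n, times):
--
--     left = 1
--     right = max(times) * n
--     answer = right
--
--     while left <= right:
--         mid = (left + right) // 2
--
--         # mid 시간안에 심사할 수 있는 사람 수 계산
--         total = sum(mid // t for t in times)
--
--         if total >= n:
--             answer = mid
--             right = mid - 1
--         else:
--             left = mid + 1
--
--     return answer
-- ===== SOURCE B (Python) =====
-- def solution(n, times):
--     # multiset-compress the examiners once, then a recursive bisection that
--     # returns the found value as Optional instead of tracking an accumulator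
--     cnt = {}
--     for t in times:
--         cnt[t] = cnt.get(t, 0) + 1
--     pairs = list(cnt.items())
--     right = max(times) * n
--
--     def examined(m):
--         return sum((m // t) * c for t, c in pairs)
--
--     def search(lo, hi):
--         if lo > hi:
--             return None
--         mid = (lo + hi) // 2
--         if examined(mid) >= n:
--             found = search(lo, mid - 1)
--             return mid if found is None else found
--         return search(mid + 1, hi)
--
--     r = search(1, right)
--     return right if r is None else r
-- ===== Notes on version B (the rewrite author's own statement) =====
-- stated objective: alternative
-- what changed: B compresses the examiner list into a value->multiplicity dict once so each bisection probe sums over distinct times only, and replaces A's accumulator-carrying while-loop by a recursive bisection returning the found value as an Optional.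
import Mathlib
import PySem

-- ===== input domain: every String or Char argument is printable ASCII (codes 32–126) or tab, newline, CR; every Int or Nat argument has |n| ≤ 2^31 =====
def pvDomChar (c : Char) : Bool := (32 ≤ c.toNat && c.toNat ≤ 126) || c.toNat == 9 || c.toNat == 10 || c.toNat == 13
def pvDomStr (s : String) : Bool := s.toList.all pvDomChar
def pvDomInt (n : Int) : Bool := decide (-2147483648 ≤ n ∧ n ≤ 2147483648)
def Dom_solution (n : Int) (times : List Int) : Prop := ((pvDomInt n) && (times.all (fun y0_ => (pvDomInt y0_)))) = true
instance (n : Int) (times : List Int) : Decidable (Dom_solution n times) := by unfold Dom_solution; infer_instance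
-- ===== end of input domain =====

-- B replaces A's accumulator-carrying while-loop by a recursive bisection returning an Option
-- and compresses the examiner list into a multiset (value → multiplicity) once, so the
-- per-probe sum runs over the distinct times only (objective: alternative decomposition).

-- ===== PORT A =====
-- total = sum(mid // t for t in times)
def solutionTotalA (mid : Int) (times : List Int) : Int :=
  (times.map (fun t => PySem.Int.floordiv mid t)).sum

-- while left <= right: …  (state left, right, answer)
def solutionLoopA (n : Int) (times : List Int) (left right answer : Int) : Int :=
  if h : left ≤ right then
    let mid := PySem.Int.floordiv (left + right) 2
    if n ≤ solutionTotalA mid times then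
      solutionLoopA n times left (mid - 1) mid
    else
      solutionLoopA n times (mid + 1) right answer
  else answer
termination_by (right + 1 - left).toNat
decreasing_by
  · have hb := PySem.Int.floordiv_two_mid_bounds h
    omega
  · have hb := PySem.Int.floordiv_two_mid_bounds h
    omega

def solution (n : Int) (times : List Int) : Int :=
  let right := (PySem.List.max? times (fun y => y)).getD 0 * n  -- max(times): raises on [], excluded by Pre_
  solutionLoopA n times 1 right right

-- ===== PORT B =====
-- cnt = {}; for t in times: cnt[t] = cnt.get(t, 0) + 1
def solutionCntB (times : List Int) : PySem.Dict Int Int :=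
  times.foldl (fun d t => d.insert t (d.getD t 0 + 1)) PySem.Dict.empty

-- examined(m) = sum((m // t) * c for t, c in pairs)
def solutionExaminedB (m : Int) (pairs : List (Int × Int)) : Int :=
  (pairs.map (fun p => PySem.Int.floordiv m p.1 * p.2)).sum

-- def search(lo, hi): … returns None or the found value
def solutionSearchB (n : Int) (pairs : List (Int × Int)) (lo hi : Int) : Option Int :=
  if h : lo ≤ hi then
    let mid := PySem.Int.floordiv (lo + hi) 2
    if n ≤ solutionExaminedB mid pairs then
      match solutionSearchB n pairs lo (mid - 1) with
      | none => some mid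
      | some r => some r
    else
      solutionSearchB n pairs (mid + 1) hi
  else none
termination_by (hi + 1 - lo).toNat
decreasing_by
  · have hb := PySem.Int.floordiv_two_mid_bounds h
    omega
  · have hb := PySem.Int.floordiv_two_mid_bounds h
    omega

def solution_alt (n : Int) (times : List Int) : Int :=
  let pairs := (solutionCntB times).items
  let right := (PySem.List.max? times (fun y => y)).getD 0 * n
  match solutionSearchB n pairs 1 right with
  | none => right
  | some r => r

-- ===== PRECONDITION & SPEC =====
-- Pre_ excludes exactly the inputs where the Python A raises: empty times (ValueError from
-- max) and 0 ∈ times when the loop runs, i.e. max(times)*n ≥ 1 (ZeroDivisionError); B raises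
-- there too.
def Pre_solution (n : Int) (times : List Int) : Prop :=
  times ≠ [] ∧ ((0 : Int) ∈ times → (times.foldl max ((0:Int))) * n < 1)
instance (n : Int) (times : List Int) : Decidable (Pre_solution n times) := by
  unfold Pre_solution; infer_instance

def pvWitness_solution : Int × List Int := (6, [7, 10])

def Spec_solution (n : Int) (times : List Int) (out : Int) : Prop := out = solution_alt n times
instance (n : Int) (times : List Int) (out : Int) : Decidable (Spec_solution n times out) := by
  unfold Spec_solution; infer_instance

-- ===== CLAIM (what is proved, stated in full; the proofs are below) =====
def Claim_equal_solution : Prop := ∀ (n : Int) (times : List Int), Dom_solution n times → Pre_solution n times → Spec_solution n times (solution n times)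

-- ===== LEMMAS AND PROOFS =====

-- the compressed sum over distinct times equals A's sum over all times
theorem solution_examined_eq (m : Int) (times : List Int) :
    solutionExaminedB m ((solutionCntB times).items) = solutionTotalA m times := by
  unfold solutionCntB solutionExaminedB solutionTotalA
  rw [PySem.Dict.foldl_insert_getD_add_one_eq_counter, PySem.Dict.items_counter,
    List.map_map]
  have hnd : (PySem.Set.ofList times : List Int).Nodup := PySem.Set.nodup_ofList times
  have hmem : ∀ x : Int, x ∈ (PySem.Set.ofList times : List Int) ↔ x ∈ times := by
    intro x; simp [PySem.Set.mem_ofList]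
  have hfin : (PySem.Set.ofList times : List Int).toFinset = times.toFinset := by
    ext x; simp [List.mem_toFinset, hmem]
  rw [Finset.sum_list_map_count times (fun t => PySem.Int.floordiv m t), ← hfin,
    List.sum_toFinset _ hnd]
  simp [Function.comp_def, mul_comm]

-- A's loop with accumulator equals B's Option-returning bisection
theorem solution_loop_eq (n : Int) (times : List Int) (lo hi a : Int) :
    solutionLoopA n times lo hi a =
      (solutionSearchB n ((solutionCntB times).items) lo hi).getD a := by
  by_cases h : lo ≤ hi
  · rw [solutionLoopA, solutionSearchB]
    simp only [h, dite_true]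
    rw [solution_examined_eq]
    by_cases hp : n ≤ solutionTotalA (PySem.Int.floordiv (lo + hi) 2) times
    · simp only [hp, if_true]
      rw [solution_loop_eq n times lo (PySem.Int.floordiv (lo + hi) 2 - 1)
            (PySem.Int.floordiv (lo + hi) 2)]
      cases solutionSearchB n ((solutionCntB times).items) lo
          (PySem.Int.floordiv (lo + hi) 2 - 1) with
      | none => rfl
      | some r => rfl
    · simp only [hp, if_false]
      exact solution_loop_eq n times (PySem.Int.floordiv (lo + hi) 2 + 1) hi a
  · rw [solutionLoopA, solutionSearchB]
    simp [h]
termination_by (hi + 1 - lo).toNat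
decreasing_by
  · have hb := PySem.Int.floordiv_two_mid_bounds h
    omega
  · have hb := PySem.Int.floordiv_two_mid_bounds h
    omega

-- ===== VERDICT (by name: the statement is the Claim_ definition above) =====
theorem solution_spec : Claim_equal_solution := by
  intro n times _ _
  unfold Spec_solution solution solution_alt
  rw [solution_loop_eq]
  cases h : solutionSearchB n ((solutionCntB times).items) 1
      ((PySem.List.max? times (fun y => y)).getD 0 * n) with
  | none => simp [h]
  | some r => simp [h]
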